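-- pv_equiv track=rewrite | github.com/cool1726/Algorithms | programmars/SummerWinterCoding/budget.py | solution
-- ===== SOURCE A (Python) =====
-- def solution(d, budget):
--     answer = 0
--     sum = 0
--     d.sort()
--     for i in d:
--         sum += i
--         if sum > budget:
--             break
--         elif sum == budget:
--             answer += 1
--             break
--         else:
--             answer += 1
--
--     return answer
-- ===== SOURCE B (Python) =====
-- def solution(d, budget):
--     # Sorts d in place like A; equivalence is about the return value.
--     # Different algorithm: since d is sorted, its prefix sums are convex
--     # (non-increasing while items are <= 0, then strictly increasing), so the
--     # first prefix reaching the budget is found by two binary searches instead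
--     # of a linear accumulate-and-break scan.
--     d.sort()
--     n = len(d)
--     sums = []
--     t = 0
--     for x in d:
--         t += x
--         sums.append(t)
--     if n and sums[0] >= budget:
--         k = 0
--     else:
--         # binary search: first index m with d[m] > 0 (sums[m:] strictly increases)
--         lo, hi = 0, n
--         while lo < hi:
--             mid = (lo + hi) // 2
--             if d[mid] <= 0:
--                 lo = mid + 1
--             else:
--                 hi = mid
--         m = lo
--         # sums[:m] is non-increasing, hence stays below budget (sums[0] < budget);
--         # binary search the increasing tail for the first prefix sum >= budget
--         lo, hi = m, n
--         while lo < hi: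
--             mid = (lo + hi) // 2
--             if sums[mid] < budget:
--                 lo = mid + 1
--             else:
--                 hi = mid
--         k = lo
--     return k + 1 if k < n and sums[k] == budget else k
-- ===== Notes on version B (the rewrite author's own statement) =====
-- stated objective: alternative
-- what changed: A's accumulate-and-break linear scan is replaced by a convexity argument: after sorting, prefix sums are non-increasing then strictly increasing, so B binary-searches for the point where items become positive and then binary-searches the increasing tail for the first prefix sum reaching the budget (O(log n) scan phase; total cost still dominated by the sort).
import Mathlib
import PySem

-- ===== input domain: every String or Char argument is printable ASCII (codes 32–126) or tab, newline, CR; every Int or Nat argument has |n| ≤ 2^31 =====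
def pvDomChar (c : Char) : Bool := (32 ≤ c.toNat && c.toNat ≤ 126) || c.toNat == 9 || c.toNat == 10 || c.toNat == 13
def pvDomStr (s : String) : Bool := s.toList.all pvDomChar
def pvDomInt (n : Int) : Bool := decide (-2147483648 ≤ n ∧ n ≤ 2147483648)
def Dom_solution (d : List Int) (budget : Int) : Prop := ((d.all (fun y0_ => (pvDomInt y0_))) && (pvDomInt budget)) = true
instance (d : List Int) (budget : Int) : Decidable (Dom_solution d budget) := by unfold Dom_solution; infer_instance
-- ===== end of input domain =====

-- B replaces A's accumulate-and-break linear scan by two binary searches over the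
-- convex prefix-sum sequence of the sorted list (alternative algorithm, same total
-- cost: the sort dominates). Both Pythons sort d in place (d.sort()); the
-- equivalence proved is about the return value.

-- ===== PORT A =====
-- A's for-loop with running sum, answer counter and the two break branches.
def solLoopA (budget : Int) : List Int → Int → Int → Int
  | [], _, answer => answer
  | i :: rest, sum, answer =>
    let sum' := sum + i
    if sum' > budget then answer
    else if sum' = budget then answer + 1
    else solLoopA budget rest sum' (answer + 1)

def solution (d : List Int) (budget : Int) : Int :=
  solLoopA budget (PySem.List.sorted d (fun x => x) false) 0 0

-- ===== PORT B =====
-- Source B's prefix-sum building loop (running total t, append)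
def prefixSums : List Int → Int → List Int
  | [], _ => []
  | x :: xs, t => (t + x) :: prefixSums xs (t + x)

-- Source B's hand-written binary-search while loop (`while lo < hi: mid = (lo+hi)//2;
-- if <low mid> then lo = mid+1 else hi = mid`), with the loop's test abstracted as p
def bsearch (p : Nat → Bool) (lo hi : Nat) : Nat :=
  if _h : lo < hi then
    let mid := (lo + hi) / 2
    if p mid then bsearch p (mid + 1) hi else bsearch p lo mid
  else lo
termination_by hi - lo
decreasing_by all_goals omega

def solution_alt (d : List Int) (budget : Int) : Int :=
  let ds := PySem.List.sorted d (fun x => x) false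
  let n := ds.length
  let sums := prefixSums ds 0
  -- in-range indexing (guarded in Source B by lo < hi ≤ n and k < n) ported as getD
  let k : Nat :=
    if 0 < n ∧ budget ≤ sums.getD 0 0 then 0
    else
      let m := bsearch (fun i => decide (ds.getD i 0 ≤ 0)) 0 n
      bsearch (fun i => decide (sums.getD i 0 < budget)) m n
  if k < n ∧ sums.getD k 0 = budget then (k : Int) + 1 else (k : Int)

-- ===== PRECONDITION & SPEC =====
def Spec_solution (d : List Int) (budget : Int) (out : Int) : Prop := out = solution_alt d budget
instance (d : List Int) (budget : Int) (out : Int) : Decidable (Spec_solution d budget out) := by unfold Spec_solution; infer_instance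

-- ===== CLAIM (what is proved, stated in full; the proofs are below) =====
def Claim_equal_solution : Prop := ∀ (d : List Int) (budget : Int), Dom_solution d budget → Spec_solution d budget (solution d budget)

-- ===== LEMMAS AND PROOFS =====

-- proof-only: first index whose prefix sum reaches the budget (linear characterisation)
def firstGE (budget : Int) : List Int → Nat
  | [] => 0
  | s :: rest => if s ≥ budget then 0 else 1 + firstGE budget rest

-- proof-only: the common "adjust by one if the reached prefix equals the budget" tail
def corr (budget : Int) (sums : List Int) : Int :=
  if firstGE budget sums < sums.length ∧ sums.getD (firstGE budget sums) 0 = budget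
  then (firstGE budget sums : Int) + 1 else (firstGE budget sums : Int)

theorem corr_nil (budget : Int) : corr budget [] = 0 := by
  simp [corr, firstGE]

theorem corr_cons_ge (budget s : Int) (rest : List Int) (h : s ≥ budget) :
    corr budget (s :: rest) = if s = budget then 1 else 0 := by
  unfold corr
  simp only [firstGE, if_pos h]
  by_cases he : s = budget
  · rw [if_pos he, if_pos ⟨by simp, by simpa using he⟩]; norm_num
  · rw [if_neg he, if_neg (by intro hc; exact he (by simpa using hc.2))]
    rfl

theorem corr_cons_lt (budget s : Int) (rest : List Int) (h : ¬ s ≥ budget) :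
    corr budget (s :: rest) = 1 + corr budget rest := by
  unfold corr
  simp only [firstGE, if_neg h]
  have hg : (s :: rest).getD (1 + firstGE budget rest) 0 = rest.getD (firstGE budget rest) 0 := by
    rw [Nat.add_comm]; rfl
  rw [hg]
  by_cases hc : firstGE budget rest < rest.length ∧ rest.getD (firstGE budget rest) 0 = budget
  · rw [if_pos hc, if_pos ⟨by simp; omega, hc.2⟩]
    push_cast; ring
  · rw [if_neg hc, if_neg (by
      intro hc2
      exact hc ⟨by have := hc2.1; simp at this; omega, hc2.2⟩)]
    push_cast; ring

-- A's loop computes corr of the prefix sums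
theorem solLoop_eq (budget : Int) :
    ∀ (l : List Int) (t a : Int),
      solLoopA budget l t a = a + corr budget (prefixSums l t) := by
  intro l
  induction l with
  | nil => intro t a; simp [solLoopA, prefixSums, corr_nil]
  | cons x rest ih =>
    intro t a
    simp only [solLoopA, prefixSums]
    by_cases hgt : t + x > budget
    · rw [if_pos hgt, corr_cons_ge budget (t + x) _ (le_of_lt hgt),
        if_neg (by omega : ¬ t + x = budget)]
      ring
    · by_cases heq : t + x = budget
      · rw [if_neg hgt, if_pos heq, corr_cons_ge budget (t + x) _ (le_of_eq heq.symm),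
          if_pos heq]
      · rw [if_neg hgt, if_neg heq, ih, corr_cons_lt budget (t + x) _ (by omega)]
        ring

theorem prefixSums_length : ∀ (l : List Int) (t : Int), (prefixSums l t).length = l.length := by
  intro l
  induction l with
  | nil => intro t; rfl
  | cons x xs ih => intro t; simp [prefixSums, ih]

theorem prefixSums_getD_zero (x : Int) (xs : List Int) (t : Int) :
    (prefixSums (x :: xs) t).getD 0 0 = t + x := rfl

theorem prefixSums_getD_succ :
    ∀ (l : List Int) (t : Int) (i : Nat), i + 1 < l.length →
      (prefixSums l t).getD (i + 1) 0 = (prefixSums l t).getD i 0 + l.getD (i + 1) 0 := by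
  intro l
  induction l with
  | nil => intro t i h; simp at h
  | cons x xs ih =>
    intro t i h
    cases i with
    | zero =>
      cases xs with
      | nil => simp at h
      | cons y ys => simp [prefixSums]
    | succ j =>
      have := ih (t + x) j (by simpa using h)
      simpa [prefixSums] using this

-- spec of firstGE: minimal index whose entry reaches x
theorem firstGE_le_length (x : Int) : ∀ (l : List Int), firstGE x l ≤ l.length := by
  intro l
  induction l with
  | nil => simp [firstGE]
  | cons s rest ih =>
    by_cases h : s ≥ x
    · simp [firstGE, h]
    · simp [firstGE, h]; omega

theorem firstGE_lt (x : Int) :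
    ∀ (l : List Int) (i : Nat), i < firstGE x l → l.getD i 0 < x := by
  intro l
  induction l with
  | nil => intro i h; simp [firstGE] at h
  | cons s rest ih =>
    intro i h
    by_cases hs : s ≥ x
    · simp [firstGE, hs] at h
    · simp only [firstGE, if_neg hs] at h
      cases i with
      | zero => simpa using (by omega : ¬ s ≥ x)
      | succ j => exact ih j (by omega)

theorem firstGE_ge (x : Int) :
    ∀ (l : List Int), firstGE x l < l.length → l.getD (firstGE x l) 0 ≥ x := by
  intro l
  induction l with
  | nil => intro h; simp [firstGE] at h
  | cons s rest ih =>
    intro h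
    by_cases hs : s ≥ x
    · simp [firstGE, hs]
    · simp only [firstGE, if_neg hs] at h ⊢
      have hg : (s :: rest).getD (1 + firstGE x rest) 0 = rest.getD (firstGE x rest) 0 := by
        rw [Nat.add_comm]; rfl
      rw [hg]
      exact ih (by simp at h; omega)

-- spec of the hand-written binary search: with a downward-closed test p on [lo,hi),
-- it returns the first index in [lo,hi] where p fails (hi if none)
theorem bsearch_spec_aux :
    ∀ (n : Nat) (p : Nat → Bool) (lo hi : Nat), hi - lo ≤ n → lo ≤ hi →
      (∀ i j, lo ≤ i → i ≤ j → j < hi → p j = true → p i = true) →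
      lo ≤ bsearch p lo hi ∧ bsearch p lo hi ≤ hi ∧
      (∀ i, lo ≤ i → i < bsearch p lo hi → p i = true) ∧
      (bsearch p lo hi < hi → p (bsearch p lo hi) = false) := by
  intro n
  induction n with
  | zero =>
    intro p lo hi hfuel hle _
    have h : ¬ lo < hi := by omega
    rw [bsearch]
    simp only [h, dite_false]
    exact ⟨le_refl _, hle, fun i h1 h2 => absurd h2 (by omega), fun hlt => hlt.elim⟩
  | succ n ihn =>
    intro p lo hi hfuel hle hdc
    by_cases h : lo < hi
    · have hmid1 : lo ≤ (lo + hi) / 2 := by omega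
      have hmid2 : (lo + hi) / 2 < hi := by omega
      by_cases hp : p ((lo + hi) / 2) = true
      · have hrec := ihn p ((lo + hi) / 2 + 1) hi (by omega) (by omega)
          (fun i j h1 h2 h3 h4 => hdc i j (by omega) h2 h3 h4)
        rcases hrec with ⟨h1, h2, h3, h4⟩
        have hb : bsearch p lo hi = bsearch p ((lo + hi) / 2 + 1) hi := by
          rw [bsearch]; simp [h, hp]
        refine ⟨by omega, by rw [hb]; exact h2, ?_, by rw [hb]; exact h4⟩
        intro i hi1 hi2
        rw [hb] at hi2
        by_cases hcase : i ≤ (lo + hi) / 2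
        · exact hdc i ((lo + hi) / 2) hi1 hcase hmid2 hp
        · exact h3 i (by omega) hi2
      · have hrec := ihn p lo ((lo + hi) / 2) (by omega) (by omega)
          (fun i j h1 h2 h3 h4 => hdc i j h1 h2 (by omega) h4)
        rcases hrec with ⟨h1, h2, h3, h4⟩
        have hb : bsearch p lo hi = bsearch p lo ((lo + hi) / 2) := by
          rw [bsearch]; simp [h, hp]
        refine ⟨by rw [hb]; exact h1, by rw [hb]; omega, by rw [hb]; exact h3, ?_⟩
        intro hlt
        rw [hb]
        by_cases hr : bsearch p lo ((lo + hi) / 2) < (lo + hi) / 2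
        · exact h4 hr
        · have he : bsearch p lo ((lo + hi) / 2) = (lo + hi) / 2 := by
            omega
          rw [he]; simpa using hp
    · rw [bsearch]
      simp only [h, dite_false]
      exact ⟨le_refl _, hle, fun i h1 h2 => absurd h2 (by omega), fun hlt => hlt.elim⟩

theorem bsearch_spec (p : Nat → Bool) (lo hi : Nat) (hle : lo ≤ hi)
    (hdc : ∀ i j, lo ≤ i → i ≤ j → j < hi → p j = true → p i = true) :
    lo ≤ bsearch p lo hi ∧ bsearch p lo hi ≤ hi ∧
    (∀ i, lo ≤ i → i < bsearch p lo hi → p i = true) ∧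
    (bsearch p lo hi < hi → p (bsearch p lo hi) = false) :=
  bsearch_spec_aux (hi - lo) p lo hi (le_refl _) hle hdc

-- sorted getD monotone
theorem sorted_getD_mono (ds : List Int) (hp : ds.Pairwise (· ≤ ·)) :
    ∀ i j, i ≤ j → j < ds.length → ds.getD i 0 ≤ ds.getD j 0 := by
  intro i j hij hj
  rcases Nat.eq_or_lt_of_le hij with h | h
  · rw [h]
  · have hi : i < ds.length := by omega
    have := (List.pairwise_iff_getElem.mp hp) i j hi hj h
    simpa [List.getD_eq_getElem?_getD, List.getElem?_eq_getElem hi,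
      List.getElem?_eq_getElem hj] using this

-- the key B-side fact: the two binary searches compute firstGE of the prefix sums
theorem kB_eq_firstGE (budget : Int) (ds : List Int) (hp : ds.Pairwise (· ≤ ·))
    (hne : 0 < ds.length) (h0 : ¬ budget ≤ (prefixSums ds 0).getD 0 0) :
    bsearch (fun i => decide ((prefixSums ds 0).getD i 0 < budget))
      (bsearch (fun i => decide (ds.getD i 0 ≤ 0)) 0 ds.length) ds.length
      = firstGE budget (prefixSums ds 0) := by
  set n := ds.length with hn
  set sums := prefixSums ds 0 with hsums
  have hslen : sums.length = n := prefixSums_length ds 0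
  -- search 1: m = first index with ds[i] > 0
  have hm := bsearch_spec (fun i => decide (ds.getD i 0 ≤ 0)) 0 n (by omega)
    (by
      intro i j h1 h2 h3 h4
      simp only [decide_eq_true_eq] at h4 ⊢
      exact le_trans (sorted_getD_mono ds hp i j h2 h3) h4)
  set m := bsearch (fun i => decide (ds.getD i 0 ≤ 0)) 0 n with hmdef
  rcases hm with ⟨_, hm2, hm3, hm4⟩
  have hdpos : ∀ j, m ≤ j → j < n → 0 < ds.getD j 0 := by
    intro j h1 h2
    have hmlt : m < n := by omega
    have := hm4 hmlt
    simp only [decide_eq_false_iff_not, not_le] at this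
    exact lt_of_lt_of_le this (sorted_getD_mono ds hp m j h1 h2)
  -- sums below budget on [0, m)
  have hlow : ∀ i, i < m → sums.getD i 0 < budget := by
    intro i hi
    have hstep : ∀ i, i < m → sums.getD i 0 ≤ sums.getD 0 0 := by
      intro i
      induction i with
      | zero => intro _; exact le_refl _
      | succ j ihj =>
        intro hj
        have hjn : j + 1 < n := by omega
        have := prefixSums_getD_succ ds 0 j (by omega)
        rw [← hsums] at this
        have hdle : ds.getD (j + 1) 0 ≤ 0 := by
          have := hm3 (j + 1) (by omega) hj
          simpa using this
        have := ihj (by omega)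
        omega
    have := hstep i hi
    omega
  -- sums monotone on [m, n)
  have hmono : ∀ i j, m ≤ i → i ≤ j → j < n → sums.getD i 0 ≤ sums.getD j 0 := by
    intro i j h1 h2 h3
    induction j with
    | zero =>
      have : i = 0 := by omega
      rw [this]
    | succ jj ihj =>
      rcases Nat.eq_or_lt_of_le h2 with he | hlt
      · rw [he]
      · have hstep := prefixSums_getD_succ ds 0 jj (by omega)
        rw [← hsums] at hstep
        have hd : 0 < ds.getD (jj + 1) 0 := hdpos (jj + 1) (by omega) h3
        have := ihj (by omega) (by omega)
        omega
  -- search 2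
  have hk := bsearch_spec (fun i => decide (sums.getD i 0 < budget)) m n hm2
    (by
      intro i j h1 h2 h3 h4
      simp only [decide_eq_true_eq] at h4 ⊢
      exact lt_of_le_of_lt (hmono i j h1 h2 h3) h4)
  set k := bsearch (fun i => decide (sums.getD i 0 < budget)) m n with hkdef
  rcases hk with ⟨hk1, hk2, hk3, hk4⟩
  -- firstGE facts
  have hf1 := firstGE_le_length budget sums
  have hf2 := firstGE_lt budget sums
  have hf3 := firstGE_ge budget sums
  set f := firstGE budget sums with hfdef
  have hfm : m ≤ f := by
    by_contra hcon
    have hfm' : f < m := by omega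
    have := hf3 (by omega)
    have := hlow f hfm'
    omega
  rcases Nat.lt_trichotomy k f with h | h | h
  · exfalso
    have hpk := hf2 k h
    have := hk4 (by omega)
    simp only [decide_eq_false_iff_not, not_lt] at this
    omega
  · exact h
  · exfalso
    have := hk3 f hfm h
    simp only [decide_eq_true_eq] at this
    have := hf3 (by rw [hslen]; omega)
    omega

-- the bridge: corr of the prefix sums equals B's binary-search expression
theorem bridge (budget : Int) (ds : List Int) (hp : ds.Pairwise (· ≤ ·)) (k : Nat)
    (hkdef : k = if 0 < ds.length ∧ budget ≤ (prefixSums ds 0).getD 0 0 then 0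
      else bsearch (fun i => decide ((prefixSums ds 0).getD i 0 < budget))
        (bsearch (fun i => decide (ds.getD i 0 ≤ 0)) 0 ds.length) ds.length) :
    corr budget (prefixSums ds 0) =
      if k < ds.length ∧ (prefixSums ds 0).getD k 0 = budget then (k : Int) + 1 else (k : Int) := by
  have hslen : (prefixSums ds 0).length = ds.length := prefixSums_length ds 0
  by_cases hcond : 0 < ds.length ∧ budget ≤ (prefixSums ds 0).getD 0 0
  · rw [if_pos hcond] at hkdef
    subst hkdef
    cases ds with
    | nil => simp at hcond
    | cons x xs =>
      have h0 : 0 + x ≥ budget := by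
        have := hcond.2
        rw [prefixSums_getD_zero] at this
        omega
      have hf : firstGE budget (prefixSums (x :: xs) 0) = 0 := by
        show firstGE budget ((0 + x) :: prefixSums xs (0 + x)) = 0
        simp only [firstGE]
        rw [if_pos h0]
      unfold corr
      rw [hf, hslen]
  · rw [if_neg hcond] at hkdef
    by_cases hds : ds = []
    · subst hds
      rw [bsearch, bsearch] at hkdef
      simp at hkdef
      subst hkdef
      simp [corr, prefixSums, firstGE]
    · have hne : 0 < ds.length := List.length_pos_of_ne_nil hds
      have h0 : ¬ budget ≤ (prefixSums ds 0).getD 0 0 := fun hc => hcond ⟨hne, hc⟩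
      have hk := kB_eq_firstGE budget ds hp hne h0
      rw [hk] at hkdef
      subst hkdef
      unfold corr
      rw [hslen]

-- ===== VERDICT (by name: the statement is the Claim_ definition above) =====
theorem solution_spec : Claim_equal_solution := by
  intro d budget _
  unfold Spec_solution solution solution_alt
  rw [solLoop_eq]
  simp only [zero_add]
  have hp : (PySem.List.sorted d (fun x => x) false).Pairwise (· ≤ ·) := by
    simpa using PySem.List.sorted_pairwise d (fun x => x)
  exact bridge budget (PySem.List.sorted d (fun x => x) false) hp _ rfl
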